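-- pv_equiv track=rewrite | github.com/dawoodaijaz97/Leetcode | maximize-subarray-gcd-score/solution.py | solve
-- ===== SOURCE A (Python) =====
-- from typing import List
--
-- def solve(nums: List[int], k: int) -> int:
--     def gcd(a, b):
--         while b:
--             a, b = b, a % b
--         return a
--
--     n = len(nums)
--     max_score = 0
--
--     # Precompute the GCDs for all subarrays
--     gcd_cache = [[0] * n for _ in range(n)]
--     for i in range(n):
--         gcd_cache[i][i] = nums[i]
--         for j in range(i + 1, n):
--             gcd_cache[i][j] = gcd(gcd_cache[i][j - 1], nums[j])
--
--     # Try to maximize the score by considering each subarray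
--     for i in range(n):
--         for j in range(i, n):
--             current_gcd = gcd_cache[i][j]
--             # Calculate the maximum possible GCD after at most k doublings
--             max_possible_gcd = current_gcd * (2 ** min(k, j - i + 1))
--             score = (j - i + 1) * max_possible_gcd
--             max_score = max(max_score, score)
--
--     return max_score
-- ===== SOURCE B (Python) =====
-- def solve(nums, k):
--     def gcd(a, b):
--         while b:
--             a, b = b, a % b
--         return a
--
--     best = 0
--     col = []  # (g, l): g = gcd of nums[i..j] for each start i, l = its length
--     for x in nums:
--         col = [(gcd(g, x), l + 1) for (g, l) in col] + [(x, 1)]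
--         for g, l in col:
--             best = max(best, l * g * 2 ** min(k, l))
--     return best
-- ===== Notes on version B (the rewrite author's own statement) =====
-- stated objective: alternative
-- what changed: B replaces A's precomputed n-by-n gcd table plus a second nested scan by a single left-to-right pass that maintains, per end index, the column of running gcds (one (gcd,length) pair per start) and a running maximum, using O(n) memory instead of O(n^2).
-- outside the precondition, e.g. on solve([2], -1): A returns 1.0, B returns 1.0
import Mathlib
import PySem

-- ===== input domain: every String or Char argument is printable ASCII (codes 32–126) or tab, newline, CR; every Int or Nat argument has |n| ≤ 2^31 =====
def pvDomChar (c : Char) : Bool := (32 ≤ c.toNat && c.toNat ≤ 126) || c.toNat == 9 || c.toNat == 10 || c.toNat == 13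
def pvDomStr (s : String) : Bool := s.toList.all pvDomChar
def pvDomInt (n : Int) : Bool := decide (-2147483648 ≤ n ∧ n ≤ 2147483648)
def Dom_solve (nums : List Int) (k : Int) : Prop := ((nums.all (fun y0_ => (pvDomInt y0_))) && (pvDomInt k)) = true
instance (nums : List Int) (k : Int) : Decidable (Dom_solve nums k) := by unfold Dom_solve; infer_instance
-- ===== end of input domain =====

-- B replaces A's precomputed n×n gcd table plus a second nested scan by a single left-to-right
-- pass keeping the column of running (gcd, length) pairs per end index (O(n) memory).

-- termination fact for the Python-style gcd loop (cited by pyGcd's decreasing_by)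
theorem pyGcd_dec (a b : Int) (hb : ¬ b = 0) : (PySem.Int.mod a b).natAbs < b.natAbs := by
  rcases lt_or_gt_of_ne hb with h | h
  · have h1 := PySem.Int.mod_neg_bounds a h
    omega
  · have h1 := PySem.Int.mod_nonneg a h
    have h2 := PySem.Int.mod_lt a h
    omega

-- Python's inner 'def gcd(a, b): while b: a, b = b, a % b; return a' (helper shared by both ports)
def pyGcd (a b : Int) : Int :=
  if h : b = 0 then a else pyGcd b (PySem.Int.mod a b)
termination_by b.natAbs
decreasing_by exact pyGcd_dec a b h

-- ===== PORT A =====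
-- literal port of A; the Python mutates gcd_cache[i] in place, here that row is read, updated and
-- written back (no other row is touched in between, so the values are the same).
-- '2 ** min(k, j-i+1)' is ported as '2 ^ (…).toNat': exact for a nonnegative exponent, which
-- Pre_solve guarantees (for negative k Python produces a float and the input is excluded).
def solve (nums : List Int) (k : Int) : Int :=
  let n : Int := PySem.List.len nums
  let cache0 : List (List Int) :=
    (PySem.List.pyRange 0 n 1).map (fun _ => List.replicate n.toNat (0 : Int))
  let cache : List (List Int) :=
    (PySem.List.pyRange 0 n 1).foldl (fun c i =>
      let row0 := PySem.List.pyGetD c i []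
      let row1 := PySem.List.pySetD row0 i (PySem.List.pyGetD nums i 0)
      let row2 := (PySem.List.pyRange (i + 1) n 1).foldl (fun r j =>
        PySem.List.pySetD r j
          (pyGcd (PySem.List.pyGetD r (j - 1) 0) (PySem.List.pyGetD nums j 0))) row1
      PySem.List.pySetD c i row2) cache0
  (PySem.List.pyRange 0 n 1).foldl (fun m i =>
    (PySem.List.pyRange i n 1).foldl (fun m j =>
      let currentGcd := PySem.List.pyGetD (PySem.List.pyGetD cache i []) j 0
      let maxPossibleGcd := currentGcd * 2 ^ (min k (j - i + 1)).toNat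
      max m ((j - i + 1) * maxPossibleGcd)) m) 0

-- ===== PORT B =====
-- literal port of Source B: one fold over nums; state = (column of (gcd, length) pairs, best)
def solve_alt (nums : List Int) (k : Int) : Int :=
  (nums.foldl (fun (st : List (Int × Int) × Int) x =>
      let col := st.1.map (fun gl => (pyGcd gl.1 x, gl.2 + 1)) ++ [(x, 1)]
      let best := col.foldl (fun b gl => max b (gl.2 * gl.1 * 2 ^ (min k gl.2).toNat)) st.2
      (col, best)) (([] : List (Int × Int)), (0 : Int))).2

-- ===== PRECONDITION & SPEC =====
-- Pre_ excludes k < 0 with nonempty nums: there Python's '2 ** min(k, j-i+1)' is a float, so A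
-- (and B) return a float, not an int of the declared return type.
def Pre_solve (nums : List Int) (k : Int) : Prop := 0 ≤ k ∨ nums = []
instance (nums : List Int) (k : Int) : Decidable (Pre_solve nums k) := by unfold Pre_solve; infer_instance
def pvWitness_solve : List Int × Int := ([2, 4], 1)
def Spec_solve (nums : List Int) (k : Int) (out : Int) : Prop := out = solve_alt nums k
instance (nums : List Int) (k : Int) (out : Int) : Decidable (Spec_solve nums k out) := by unfold Spec_solve; infer_instance

-- ===== CLAIM (what is proved, stated in full; the proofs are below) =====
def Claim_equal_solve : Prop := ∀ (nums : List Int) (k : Int), Dom_solve nums k → Pre_solve nums k → Spec_solve nums k (solve nums k)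

-- ===== LEMMAS AND PROOFS =====

-- gcd of the segment nums[i..i+d]
def segGcd (nums : List Int) (i : ℕ) : ℕ → Int
  | 0 => nums.getD i 0
  | d + 1 => pyGcd (segGcd nums i d) (nums.getD (i + d + 1) 0)

-- the score of a subarray of length len and gcd g
def scoreOf (k : Int) (len : ℕ) (g : Int) : Int := (len : Int) * (g * 2 ^ (min k (len : Int)).toNat)

-- score of the subarray with start p.1 and inclusive end p.2 (p.1 ≤ p.2)
def idxF (nums : List Int) (k : Int) (p : ℕ × ℕ) : Int :=
  scoreOf k (p.2 + 1 - p.1) (segGcd nums p.1 (p.2 - p.1))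

-- all subarray scores in A's row-major order
def Slist (nums : List Int) (k : Int) : List Int :=
  (List.range nums.length).flatMap (fun i =>
    (List.range (nums.length - i)).map (fun d => idxF nums k (i, i + d)))

-- subarray scores with end index < t, in B's column-major order
def Tlist (nums : List Int) (k : Int) (t : ℕ) : List Int :=
  (List.range t).flatMap (fun j => (List.range (j + 1)).map (fun i => idxF nums k (i, j)))

-- one update of A's inner cache-filling loop, in clean (ℕ-indexed) form
def rowStep (nums : List Int) (r : List Int) (j : ℕ) : List Int :=
  r.set j (pyGcd (r.getD (j - 1) 0) (nums.getD j 0))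

-- row i of the cache after its first m inner-loop iterations
def rowPart (nums : List Int) (i m : ℕ) : List Int :=
  (List.range m).foldl (fun r d => rowStep nums r (i + 1 + d))
    ((List.replicate nums.length (0 : Int)).set i (nums.getD i 0))

-- the body of A's outer cache-filling loop applied to the stored row x
def buildRow (nums : List Int) (i : ℕ) (x : List Int) : List Int :=
  (List.range (nums.length - (i + 1))).foldl (fun r d => rowStep nums r (i + 1 + d))
    (x.set i (nums.getD i 0))

-- the finished cache
def cacheClean (nums : List Int) : List (List Int) :=
  (List.range nums.length).map (fun i => buildRow nums i (List.replicate nums.length (0 : Int)))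

theorem rowPart_succ (nums : List Int) (i m : ℕ) :
    rowPart nums i (m + 1) = rowStep nums (rowPart nums i m) (i + 1 + m) := by
  simp [rowPart, List.range_succ]

theorem rowAux (nums : List Int) (i : ℕ) : ∀ (m : ℕ), i + m < nums.length →
    (rowPart nums i m).length = nums.length ∧
    ∀ j, i ≤ j → j ≤ i + m → (rowPart nums i m).getD j 0 = segGcd nums i (j - i) := by
  intro m
  induction m with
  | zero =>
    intro him
    constructor
    · simp [rowPart]
    · intro j h1 h2
      have hj : j = i := by omega
      subst hj
      have hlen : j < (List.replicate nums.length (0 : Int)).length := by simpa using him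
      simp [rowPart, List.getD, List.getElem?_set_self hlen, segGcd]
  | succ m ih =>
    intro him
    obtain ⟨hlen, hvals⟩ := ih (by omega)
    rw [rowPart_succ]
    constructor
    · simp [rowStep, hlen]
    · intro j h1 h2
      by_cases hj : j = i + 1 + m
      · subst hj
        have hread : (rowPart nums i m)[i + m]?.getD 0 = segGcd nums i m := by
          have := hvals (i + m) (by omega) (by omega)
          simpa [List.getD, Nat.add_sub_cancel_left] using this
        have hlt : i + 1 + m < (rowPart nums i m).length := by rw [hlen]; omega
        have hidx : i + 1 + m - 1 = i + m := by omega
        simp only [rowStep, hidx, List.getD, List.getElem?_set_self hlt, Option.getD_some, hread]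
        have h5 : i + 1 + m - i = m + 1 := by omega
        rw [h5, segGcd]
        have h6 : i + m + 1 = i + 1 + m := by omega
        rw [h6]
        simp [List.getD]
      · have hj' : j < i + 1 + m := by omega
        simp only [rowStep, List.getD, List.getElem?_set_ne (by omega : i + 1 + m ≠ j)]
        have := hvals j h1 (by omega)
        simpa [List.getD] using this

theorem cacheAux (nums : List Int) : ∀ m, m ≤ nums.length →
    (List.range m).foldl (fun c i => c.set i (buildRow nums i (c.getD i [])))
      ((List.range nums.length).map (fun _ => List.replicate nums.length (0 : Int)))
    = (List.range nums.length).map (fun i =>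
        if i < m then buildRow nums i (List.replicate nums.length (0 : Int))
        else List.replicate nums.length (0 : Int)) := by
  intro m
  induction m with
  | zero => simp
  | succ m ih =>
    intro hm
    rw [List.range_succ, List.foldl_append, List.foldl_cons, List.foldl_nil, ih (by omega)]
    have hmn : m < nums.length := by omega
    have hget : ((List.range nums.length).map (fun i =>
        if i < m then buildRow nums i (List.replicate nums.length (0 : Int))
        else List.replicate nums.length (0 : Int))).getD m []
        = List.replicate nums.length (0 : Int) := by
      rw [PySem.List.getD_map_range _ _ _ _ hmn]
      simp
    rw [hget]
    apply List.ext_getElem?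
    intro j
    by_cases hjn : j < nums.length
    · by_cases hjm : j = m
      · subst hjm
        rw [List.getElem?_set_self (by simpa using hjn), List.getElem?_map,
          List.getElem?_range hjn]
        simp
      · rw [List.getElem?_set_ne (by omega : m ≠ j), List.getElem?_map, List.getElem?_map,
          List.getElem?_range hjn]
        simp only [Option.map_some]
        congr 1
        by_cases h : j < m
        · simp [h, show j < m + 1 by omega]
        · simp [h, show ¬ (j < m + 1) by omega]
    · rw [List.getElem?_set_ne (by omega : m ≠ j)]
      rw [List.getElem?_map, List.getElem?_map, List.getElem?_eq_none (by simpa using hjn)]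
      simp

theorem pyRange_cast_cast (a n : ℕ) :
    PySem.List.pyRange (a : Int) (n : Int) 1 = (List.range (n - a)).map (fun d => ((a + d : ℕ) : Int)) := by
  rw [PySem.List.pyRange_one]
  have h : ((n : Int) - (a : Int)).toNat = n - a := by omega
  rw [h]
  apply List.map_congr_left
  intro d _
  push_cast
  ring

theorem innerFold_eq (nums : List Int) (i : ℕ) (init : List Int) :
    (PySem.List.pyRange ((i : Int) + 1) (nums.length : Int) 1).foldl
      (fun r j => PySem.List.pySetD r j
        (pyGcd (PySem.List.pyGetD r (j - 1) 0) (PySem.List.pyGetD nums j 0))) init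
    = (List.range (nums.length - (i + 1))).foldl (fun r d => rowStep nums r (i + 1 + d)) init := by
  have hc : ((i : Int) + 1) = ((i + 1 : ℕ) : Int) := by push_cast; ring
  rw [hc, pyRange_cast_cast, List.foldl_map]
  apply PySem.List.foldl_congr_mem
  intro r d _
  have h1 : (((i + 1) + d : ℕ) : Int) - 1 = ((i + d : ℕ) : Int) := by push_cast; ring
  rw [h1]
  simp only [PySem.List.pySetD_natCast, PySem.List.pyGetD_natCast, rowStep,
    show i + 1 + d - 1 = i + d from by omega]

theorem cacheRaw_eq (nums : List Int) :
    List.foldl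
      (fun c (i : ℕ) => PySem.List.pySetD c (i : Int)
        ((PySem.List.pyRange ((i : Int) + 1) (nums.length : Int) 1).foldl
          (fun r j => PySem.List.pySetD r j (pyGcd (PySem.List.pyGetD r (j - 1) 0) (PySem.List.pyGetD nums j 0)))
          (PySem.List.pySetD (PySem.List.pyGetD c (i : Int) []) (i : Int) (PySem.List.pyGetD nums (i : Int) 0))))
      ((List.range nums.length).map ((fun _ => List.replicate nums.length (0 : Int)) ∘ (fun k : ℕ => (k : Int))))
      (List.range nums.length)
    = cacheClean nums := by
  have hbody : ∀ (c : List (List Int)), ∀ i ∈ List.range nums.length,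
      PySem.List.pySetD c (i : Int)
        ((PySem.List.pyRange ((i : Int) + 1) (nums.length : Int) 1).foldl
          (fun r j => PySem.List.pySetD r j (pyGcd (PySem.List.pyGetD r (j - 1) 0) (PySem.List.pyGetD nums j 0)))
          (PySem.List.pySetD (PySem.List.pyGetD c (i : Int) []) (i : Int) (PySem.List.pyGetD nums (i : Int) 0)))
      = c.set i (buildRow nums i (c.getD i [])) := by
    intro c i _
    rw [innerFold_eq]
    simp [buildRow]
  rw [PySem.List.foldl_congr_mem _ _ _ _ hbody]
  have h2 := cacheAux nums nums.length (le_refl _)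
  have h3 : (List.range nums.length).map ((fun _ => List.replicate nums.length (0 : Int)) ∘ (fun k : ℕ => (k : Int)))
      = (List.range nums.length).map (fun _ => List.replicate nums.length (0 : Int)) := rfl
  rw [h3, h2, cacheClean]
  apply List.map_congr_left
  intro i hi
  simp [List.mem_range.mp hi]

theorem cacheClean_val (nums : List Int) (i j : ℕ) (hij : i ≤ j) (hj : j < nums.length) :
    ((cacheClean nums).getD i []).getD j 0 = segGcd nums i (j - i) := by
  have hi : i < nums.length := by omega
  rw [cacheClean, PySem.List.getD_map_range _ _ _ _ hi]
  have hb : buildRow nums i (List.replicate nums.length (0 : Int))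
      = rowPart nums i (nums.length - (i + 1)) := rfl
  rw [hb]
  exact (rowAux nums i (nums.length - (i + 1)) (by omega)).2 j hij (by omega)

theorem solveA_eq (nums : List Int) (k : Int) :
    solve nums k = (Slist nums k).foldl max 0 := by
  unfold solve
  simp only [PySem.List.len_eq, PySem.List.pyRange_zero_nat, Int.toNat_natCast, List.map_map,
    List.foldl_map]
  rw [cacheRaw_eq]
  rw [Slist, List.foldl_flatMap]
  apply PySem.List.foldl_congr_mem
  intro m i hi
  rw [List.foldl_map, pyRange_cast_cast i nums.length, List.foldl_map]
  apply PySem.List.foldl_congr_mem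
  intro b d hd
  have hi' : i < nums.length := List.mem_range.mp hi
  have hd' : d < nums.length - i := List.mem_range.mp hd
  have h1 : ((i + d : ℕ) : Int) - (i : Int) + 1 = ((d + 1 : ℕ) : Int) := by push_cast; ring
  rw [h1]
  simp only [PySem.List.pyGetD_natCast]
  rw [cacheClean_val nums i (i + d) (by omega) (by omega)]
  have h2 : i + d + 1 - i = d + 1 := by omega
  have h3 : i + d - i = d := by omega
  simp only [idxF, scoreOf, h2, h3]

theorem altInv (nums : List Int) (k : Int) : ∀ t, t ≤ nums.length →
    ((nums.take t).foldl (fun (st : List (Int × Int) × Int) x =>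
      let col := st.1.map (fun gl => (pyGcd gl.1 x, gl.2 + 1)) ++ [(x, 1)]
      let best := col.foldl (fun b gl => max b (gl.2 * gl.1 * 2 ^ (min k gl.2).toNat)) st.2
      (col, best)) (([] : List (Int × Int)), (0 : Int)))
    = ((List.range t).map (fun i => (segGcd nums i (t - 1 - i), ((t - i : ℕ) : Int))),
       (Tlist nums k t).foldl max 0) := by
  intro t
  induction t with
  | zero => intro _; simp [Tlist]
  | succ t ih =>
    intro ht
    have ht' : t < nums.length := by omega
    have htake : nums.take (t + 1) = nums.take t ++ [nums.getD t 0] := by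
      rw [List.take_add_one]
      simp [List.getD_eq_getElem?_getD, List.getElem?_eq_getElem ht']
    rw [htake, List.foldl_append, ih (by omega)]
    have hcol : ((List.range t).map (fun i => (segGcd nums i (t - 1 - i), ((t - i : ℕ) : Int)))).map
          (fun gl => (pyGcd gl.1 (nums.getD t 0), gl.2 + 1)) ++ [(nums.getD t 0, (1 : Int))]
        = (List.range (t + 1)).map (fun i => (segGcd nums i (t - i), ((t + 1 - i : ℕ) : Int))) := by
      rw [List.range_succ, List.map_append, List.map_map]
      congr 1
      · apply List.map_congr_left
        intro i hi
        have hi' : i < t := List.mem_range.mp hi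
        have h1 : t - i = (t - 1 - i) + 1 := by omega
        have h2 : i + (t - 1 - i) + 1 = t := by omega
        simp only [Function.comp]
        rw [h1, segGcd, h2]
        simp only [Prod.mk.injEq, true_and]
        push_cast
        omega
      · simp [segGcd]
    simp only [List.foldl_cons, List.foldl_nil, Nat.add_sub_cancel]
    have hT : Tlist nums k (t + 1)
        = Tlist nums k t ++ (List.range (t + 1)).map (fun i => idxF nums k (i, t)) := by
      simp [Tlist, List.range_succ]
    rw [Prod.mk.injEq]
    constructor
    · exact hcol
    · rw [hcol, hT, List.foldl_append, List.foldl_map, List.foldl_map]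
      apply PySem.List.foldl_congr_mem
      intro b i hi
      have hi' : i < t + 1 := List.mem_range.mp hi
      simp only [idxF, scoreOf]
      ring_nf

theorem solveB_eq (nums : List Int) (k : Int) :
    solve_alt nums k = (Tlist nums k nums.length).foldl max 0 := by
  unfold solve_alt
  conv_lhs => rw [show nums = nums.take nums.length from (List.take_length).symm]
  rw [altInv nums k nums.length (le_refl _)]

theorem foldl_max_eq_of_mem_iff (a : Int) (S T : List Int)
    (h : ∀ x, x ∈ S ↔ x ∈ T) : S.foldl max a = T.foldl max a := by
  apply le_antisymm
  · rcases PySem.List.foldl_max_mem S a with hc | hc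
    · rw [hc]; exact (PySem.List.le_foldl_max T a).1
    · exact (PySem.List.le_foldl_max T a).2 _ ((h _).1 hc)
  · rcases PySem.List.foldl_max_mem T a with hc | hc
    · rw [hc]; exact (PySem.List.le_foldl_max S a).1
    · exact (PySem.List.le_foldl_max S a).2 _ ((h _).2 hc)

theorem mem_S_iff_mem_T (nums : List Int) (k : Int) (x : Int) :
    x ∈ Slist nums k ↔ x ∈ Tlist nums k nums.length := by
  simp only [Slist, Tlist, List.mem_flatMap, List.mem_map, List.mem_range]
  constructor
  · rintro ⟨i, hi, d, hd, rfl⟩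
    exact ⟨i + d, by omega, i, by omega, rfl⟩
  · rintro ⟨j, hj, i, hi, rfl⟩
    refine ⟨i, by omega, j - i, by omega, ?_⟩
    congr 2
    omega

-- ===== VERDICT (by name: the statement is the Claim_ definition above) =====
theorem solve_spec : Claim_equal_solve := by
  intro nums k _ _
  unfold Spec_solve
  rw [solveA_eq, solveB_eq]
  exact foldl_max_eq_of_mem_iff 0 _ _ (mem_S_iff_mem_T nums k)
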